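-- pv_equiv track=rewrite | github.com/knight-furry/Python-Programming | even_sort.py | even_sort
-- ===== SOURCE A (Python) =====
-- def even_sort(l):
-- 	for i in range(len(l)):
-- 		pos = i
-- 		for j in range(i,len(l)):
-- 			if l[i]%2 == 0 and l[j] == 0 :
-- 				if l[pos] < l[j] :
-- 					temp = l[pos]
-- 					l[pos] = l[j]
-- 					l[j] = temp
-- 	return l
-- ===== SOURCE B (Python) =====
-- def even_sort(l):
--     # One pass with a precomputed list of zero positions and a pointer to the
--     # first unconsumed zero >= i.  Mutates l in place like the original.
--     zeros = [k for k, v in enumerate(l) if v == 0]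
--     p = 0
--     for i in range(len(l)):
--         while p < len(zeros) and zeros[p] < i:
--             p += 1
--         if l[i] < 0 and l[i] % 2 == 0 and p < len(zeros):
--             j = zeros[p]
--             l[i], l[j] = l[j], l[i]
--             p += 1
--     return l
-- ===== Notes on version B (the rewrite author's own statement) =====
-- stated objective: faster
-- what changed: Replaced the quadratic nested scan (inner loop re-searching for a zero for every index) by a single pass over a precomputed list of zero positions with a monotone pointer; both versions mutate l in place and return it.
import Mathlib
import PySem

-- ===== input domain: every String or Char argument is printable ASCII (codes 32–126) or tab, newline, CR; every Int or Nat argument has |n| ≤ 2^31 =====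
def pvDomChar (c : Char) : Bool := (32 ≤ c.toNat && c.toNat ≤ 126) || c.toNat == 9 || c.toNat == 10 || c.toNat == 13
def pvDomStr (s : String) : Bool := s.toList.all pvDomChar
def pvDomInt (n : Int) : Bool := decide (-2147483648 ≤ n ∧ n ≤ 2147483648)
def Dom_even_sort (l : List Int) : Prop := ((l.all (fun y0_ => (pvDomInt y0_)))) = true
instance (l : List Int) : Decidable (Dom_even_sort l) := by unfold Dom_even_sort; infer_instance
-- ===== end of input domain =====

-- B replaces A's quadratic nested zero-search by a single pass over a precomputed
-- zero-position list with a monotone pointer (asymptotically faster); both Pythons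
-- mutate l in place the same way, and the equivalence proved is about the return value.


-- ===== PORT A =====
-- inner body of A: `if l[i]%2 == 0 and l[j] == 0: if l[pos] < l[j]: swap l[pos],l[j]`
-- (pos is always i; indices are in range, so getD with default 0 is exact)
def pvInnerStep (i : Nat) (acc : List Int) (j : Nat) : List Int :=
  if PySem.Int.mod (acc.getD i 0) 2 = 0 ∧ acc.getD j 0 = 0 then
    if acc.getD i 0 < acc.getD j 0 then
      let temp := acc.getD i 0
      (acc.set i (acc.getD j 0)).set j temp
    else acc
  else acc

def even_sort (l : List Int) : List Int :=
  (List.range l.length).foldl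
    (fun acc i => (List.range' i (l.length - i)).foldl (pvInnerStep i) acc) l

-- ===== PORT B =====
-- `while p < len(zeros) and zeros[p] < i: p += 1` — the suffix zeros[p:] is the state
def pvSkip (i : Nat) : List Nat → List Nat
  | [] => []
  | k :: rest => if k < i then pvSkip i rest else k :: rest

def pvStepB (st : List Int × List Nat) (i : Nat) : List Int × List Nat :=
  let acc := st.1
  let zs := pvSkip i st.2
  if acc.getD i 0 < 0 ∧ PySem.Int.mod (acc.getD i 0) 2 = 0 then
    match zs with
    | j :: rest => ((acc.set i (acc.getD j 0)).set j (acc.getD i 0), rest)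
    | [] => (acc, zs)
  else (acc, zs)

def even_sort_alt (l : List Int) : List Int :=
  let zeros := (List.range l.length).filter (fun k => l.getD k 0 == 0)
  ((List.range l.length).foldl pvStepB (l, zeros)).1

-- ===== PRECONDITION & SPEC =====
def Spec_even_sort (l : List Int) (out : List Int) : Prop := out = even_sort_alt l
instance (l : List Int) (out : List Int) : Decidable (Spec_even_sort l out) := by unfold Spec_even_sort; infer_instance

-- ===== CLAIM (what is proved, stated in full; the proofs are below) =====
def Claim_equal_even_sort : Prop := ∀ (l : List Int), Dom_even_sort l → Spec_even_sort l (even_sort l)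

-- ===== LEMMAS AND PROOFS =====

-- zero positions of acc in [i, n)
def pvZeros (acc : List Int) (i n : Nat) : List Nat :=
  (List.range' i (n - i)).filter (fun k => acc.getD k 0 == 0)

lemma pvZeros_eq_nil (acc : List Int) (i n : Nat) (h : n ≤ i) : pvZeros acc i n = [] := by
  simp [pvZeros, Nat.sub_eq_zero_of_le h]

lemma pvZeros_cons (acc : List Int) (i n : Nat) (h : i < n) :
    pvZeros acc i n =
      (if acc.getD i 0 = 0 then [i] else []) ++ pvZeros acc (i+1) n := by
  have hm : n - i = (n - (i+1)) + 1 := by omega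
  simp only [pvZeros, hm, List.range'_succ, List.filter_cons]
  split_ifs with h1 h2 h2 <;> simp_all

lemma pvZeros_lb (acc : List Int) (i n k : Nat) (hk : k ∈ pvZeros acc i n) : i ≤ k := by
  simp only [pvZeros, List.mem_filter, List.mem_range'] at hk
  omega

lemma pvSkip_of_lb (i : Nat) (zs : List Nat) (h : ∀ k ∈ zs, i ≤ k) : pvSkip i zs = zs := by
  cases zs with
  | nil => rfl
  | cons k rest =>
    have := h k (by simp)
    simp [pvSkip, Nat.not_lt.mpr this]

-- head structure of pvZeros
lemma pvZeros_head : ∀ (m i : Nat) (acc : List Int) (j : Nat) (rest : List Nat), n' = i + m →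
    pvZeros acc i n' = j :: rest →
    i ≤ j ∧ j < n' ∧ acc.getD j 0 = 0 ∧ rest = pvZeros acc (j+1) n' ∧
      (∀ k, i ≤ k → k < j → acc.getD k 0 ≠ 0) := by
  intro m
  induction m with
  | zero =>
    intro i acc j rest hn h
    rw [pvZeros_eq_nil acc i n' (by omega)] at h
    exact absurd h (by simp)
  | succ m ih =>
    intro i acc j rest hn h
    rw [pvZeros_cons acc i n' (by omega)] at h
    by_cases h0 : acc.getD i 0 = 0
    · rw [if_pos h0, List.singleton_append] at h
      injection h with hji hr
      subst hji
      exact ⟨le_refl _, by omega, h0, hr.symm, fun k h1 h2 => by omega⟩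
    · rw [if_neg h0, List.nil_append] at h
      obtain ⟨h1, h2, h3, h4, h5⟩ := ih (i+1) acc j rest (by omega) h
      refine ⟨by omega, h2, h3, h4, ?_⟩
      intro k hk1 hk2
      rcases Nat.eq_or_lt_of_le hk1 with heq | hlt
      · exact heq ▸ h0
      · exact h5 k hlt hk2

-- getD facts for the swap
lemma pv_getD_set_ne (acc : List Int) (a : Int) (i k : Nat) (h : k ≠ i) :
    (acc.set i a).getD k 0 = acc.getD k 0 := by
  simp [List.getD, List.getElem?_set_ne (Ne.symm h)]

lemma pv_getD_set_self (acc : List Int) (a : Int) (i : Nat) (h : i < acc.length) :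
    (acc.set i a).getD i 0 = a := by
  simp [List.getD, h]

-- if acc[i] = 0, A's inner loop does nothing
lemma pvInner_fix (i : Nat) (acc : List Int) (h : acc.getD i 0 = 0) :
    ∀ js : List Nat, js.foldl (pvInnerStep i) acc = acc := by
  intro js
  induction js with
  | nil => rfl
  | cons j rest ih =>
    have hstep : pvInnerStep i acc j = acc := by
      unfold pvInnerStep
      split_ifs with h1 h2
      · rw [h, h1.2] at h2; exact absurd h2 (by omega)
      · rfl
      · rfl
    simp [List.foldl_cons, hstep, ih]

-- if acc[i] is not a negative even, A's inner loop does nothing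
lemma pvInner_fix' (i : Nat) (acc : List Int)
    (h : ¬ (acc.getD i 0 < 0 ∧ PySem.Int.mod (acc.getD i 0) 2 = 0)) :
    ∀ js : List Nat, js.foldl (pvInnerStep i) acc = acc := by
  intro js
  induction js with
  | nil => rfl
  | cons j rest ih =>
    have hstep : pvInnerStep i acc j = acc := by
      unfold pvInnerStep
      split_ifs with h1 h2
      · rw [h1.2] at h2
        exact absurd ⟨h2, h1.1⟩ h
      · rfl
      · rfl
    simp [List.foldl_cons, hstep, ih]

-- characterisation of A's inner loop when acc[i] is a negative even:
-- it swaps i with the first zero among js (js.find?), if any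
lemma pvInner_char (i : Nat) :
    ∀ (js : List Nat) (acc : List Int),
    acc.getD i 0 < 0 → PySem.Int.mod (acc.getD i 0) 2 = 0 → i < acc.length →
    js.foldl (pvInnerStep i) acc =
      match js.find? (fun j => acc.getD j 0 == 0) with
      | some j => (acc.set i (acc.getD j 0)).set j (acc.getD i 0)
      | none => acc := by
  intro js
  induction js with
  | nil => intro acc _ _ _; rfl
  | cons j rest ih =>
    intro acc hneg heven hlen
    by_cases hz : acc.getD j 0 = 0
    · have hij : j ≠ i := by intro h; rw [h] at hz; rw [hz] at hneg; exact absurd hneg (by omega)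
      have hstep : pvInnerStep i acc j =
          (acc.set i (acc.getD j 0)).set j (acc.getD i 0) := by
        unfold pvInnerStep
        rw [if_pos ⟨heven, hz⟩, if_pos (by rw [hz]; exact hneg)]
      have hzero : ((acc.set i (acc.getD j 0)).set j (acc.getD i 0)).getD i 0 = 0 := by
        rw [pv_getD_set_ne _ _ _ _ (Ne.symm hij), pv_getD_set_self _ _ _ hlen, hz]
      simp only [List.foldl_cons, hstep]
      rw [pvInner_fix i _ hzero rest, List.find?_cons_of_pos (by simpa [List.getD] using hz)]
    · have hstep : pvInnerStep i acc j = acc := by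
        unfold pvInnerStep
        split_ifs with h1 h2
        · exact absurd h1.2 hz
        · rfl
        · rfl
      simp only [List.foldl_cons, hstep]
      rw [ih acc hneg heven hlen, List.find?_cons_of_neg (by simpa [List.getD] using hz)]

-- head of the filtered list = find? on the underlying list
lemma pv_find_filter (p : Nat → Bool) :
    ∀ js : List Nat, js.find? p = (js.filter p).head? := by
  intro js
  induction js with
  | nil => rfl
  | cons j rest ih =>
    by_cases h : p j = true
    · rw [List.find?_cons_of_pos h, List.filter_cons_of_pos h, List.head?_cons]
    · have hb : p j = false := by simpa using h
      rw [List.find?_cons_of_neg (by simp [hb]), List.filter_cons_of_neg h, ih]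

lemma pvZeros_congr (acc acc' : List Int) (i n : Nat)
    (h : ∀ k, i ≤ k → k < n → acc.getD k 0 = acc'.getD k 0) :
    pvZeros acc i n = pvZeros acc' i n := by
  unfold pvZeros
  apply List.filter_congr
  intro k hk
  simp only [List.mem_range'] at hk
  rw [h k (by omega) (by omega)]

lemma pvZeros_drop : ∀ (d i n : Nat) (acc : List Int), i + d ≤ n →
    (∀ k, i ≤ k → k < i + d → acc.getD k 0 ≠ 0) →
    pvZeros acc i n = pvZeros acc (i + d) n := by
  intro d
  induction d with
  | zero => intro i n acc _ _; rfl
  | succ d ih =>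
    intro i n acc hle hnz
    rw [pvZeros_cons acc i n (by omega), if_neg (hnz i (le_refl _) (by omega))]
    simp only [List.nil_append]
    have := ih (i+1) n acc (by omega) (fun k h1 h2 => hnz k (by omega) (by omega))
    rw [this]
    congr 1
    omega

-- ===== the main simulation lemma =====
lemma pvMain : ∀ (m i : Nat) (acc : List Int) (zs : List Nat) (n : Nat),
    acc.length = n → n = i + m → pvSkip i zs = pvZeros acc i n →
    ((List.range' i m).foldl pvStepB (acc, zs)).1 =
      (List.range' i m).foldl (fun a k => (List.range' k (n - k)).foldl (pvInnerStep k) a) acc := by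
  intro m
  induction m with
  | zero => intro i acc zs n _ _ _; rfl
  | succ m ih =>
    intro i acc zs n hlen hn hinv
    have hi : i < n := by omega
    have hstepB : pvStepB (acc, zs) i =
        (if acc.getD i 0 < 0 ∧ PySem.Int.mod (acc.getD i 0) 2 = 0 then
          match pvZeros acc i n with
          | j :: rest => ((acc.set i (acc.getD j 0)).set j (acc.getD i 0), rest)
          | [] => (acc, pvZeros acc i n)
        else (acc, pvZeros acc i n)) := by
      unfold pvStepB
      rw [hinv]
    by_cases hcond : acc.getD i 0 < 0 ∧ PySem.Int.mod (acc.getD i 0) 2 = 0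
    · -- negative even at i
      have hilen : i < acc.length := by
        by_contra hge
        have : acc.getD i 0 = 0 := by
          simp [List.getD, List.getElem?_eq_none (by omega : acc.length ≤ i)]
        omega
      have hA : (List.range' i (n - i)).foldl (pvInnerStep i) acc =
          match (List.range' i (n - i)).find? (fun j => acc.getD j 0 == 0) with
          | some j => (acc.set i (acc.getD j 0)).set j (acc.getD i 0)
          | none => acc := pvInner_char i _ acc hcond.1 hcond.2 hilen
      have hfind : (List.range' i (n - i)).find? (fun j => acc.getD j 0 == 0)
          = (pvZeros acc i n).head? := pv_find_filter _ _
      cases hzs : pvZeros acc i n with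
      | nil =>
        -- no zero from i on: both sides leave acc unchanged
        have hAi : (List.range' i (n - i)).foldl (pvInnerStep i) acc = acc := by
          rw [hA, hfind, hzs]; rfl
        rw [List.range'_succ, List.foldl_cons, List.foldl_cons, hstepB, if_pos hcond, hzs, hAi]
        apply ih (i+1) acc [] n hlen (by omega)
        have : pvZeros acc (i+1) n = [] := by
          have := pvZeros_cons acc i n hi
          rw [hzs] at this
          rcases List.append_eq_nil_iff.mp this.symm with ⟨_, h2⟩
          exact h2
        rw [this]; rfl
      | cons j rest =>
        obtain ⟨hij, hjn, hj0, hrest, hnoz⟩ := pvZeros_head (n - i) i acc j rest (by omega) hzs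
        have hjne : j ≠ i := by
          intro h; rw [h] at hj0
          have := hcond.1; rw [hj0] at this; exact absurd this (by omega)
        have hjlen : j < acc.length := by omega
        set acc' := (acc.set i (acc.getD j 0)).set j (acc.getD i 0) with hacc'
        have hAi : (List.range' i (n - i)).foldl (pvInnerStep i) acc = acc' := by
          rw [hA, hfind, hzs]; rfl
        have hlen' : acc'.length = n := by simp [hacc', hlen]
        -- acc' agrees with acc above j, and has no zeros in [i+1, j+1)
        have hge : ∀ k, j + 1 ≤ k → k < n → acc'.getD k 0 = acc.getD k 0 := by
          intro k h1 h2
          rw [hacc', pv_getD_set_ne _ _ _ _ (by omega), pv_getD_set_ne _ _ _ _ (by omega)]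
        have hzrest : pvZeros acc' (i+1) n = rest := by
          rw [pvZeros_drop (j - i) (i+1) n acc' (by omega) ?nz]
          · have : i + 1 + (j - i) = j + 1 := by omega
            rw [this, pvZeros_congr acc' acc (j+1) n (fun k h1 h2 => hge k h1 h2), ← hrest]
          case nz =>
            intro k h1 h2
            have hki : k ≠ i := by omega
            by_cases hkj : k = j
            · subst hkj
              rw [hacc', pv_getD_set_self _ _ _ (by simpa using hjlen)]
              intro h; rw [h] at hcond; exact absurd hcond.1 (by omega)
            · rw [hacc', pv_getD_set_ne _ _ _ _ hkj, pv_getD_set_ne _ _ _ _ hki]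
              exact hnoz k (by omega) (by omega)
        rw [List.range'_succ, List.foldl_cons, List.foldl_cons, hstepB, if_pos hcond, hzs, hAi]
        apply ih (i+1) acc' rest n hlen' (by omega)
        rw [← hzrest]
        exact pvSkip_of_lb _ _ (fun k hk => by have := pvZeros_lb acc' (i+1) n k hk; omega)
    · -- not a negative even: both sides leave acc unchanged
      have hAi : (List.range' i (n - i)).foldl (pvInnerStep i) acc = acc :=
        pvInner_fix' i acc hcond _
      rw [List.range'_succ, List.foldl_cons, List.foldl_cons, hstepB, if_neg hcond, hAi]
      apply ih (i+1) acc (pvZeros acc i n) n hlen (by omega)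
      rw [pvZeros_cons acc i n hi]
      by_cases h0 : acc.getD i 0 = 0
      · simp only [h0]
        show pvSkip (i+1) (i :: pvZeros acc (i+1) n) = _
        rw [pvSkip]
        rw [if_pos (by omega)]
        exact pvSkip_of_lb _ _ (fun k hk => by have := pvZeros_lb acc (i+1) n k hk; omega)
      · simp only [h0]
        exact pvSkip_of_lb _ _ (fun k hk => by have := pvZeros_lb acc (i+1) n k hk; omega)

-- ===== VERDICT (by name: the statement is the Claim_ definition above) =====
theorem even_sort_spec : Claim_equal_even_sort := by
  intro l _
  unfold Spec_even_sort even_sort even_sort_alt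
  have h0 : List.range l.length = List.range' 0 l.length := by
    rw [List.range_eq_range']
  rw [h0]
  have := pvMain l.length 0 l ((List.range' 0 l.length).filter (fun k => l.getD k 0 == 0))
      l.length rfl (by omega) ?_
  · simpa [Nat.sub_zero] using this.symm
  · have : pvZeros l 0 l.length = (List.range' 0 l.length).filter (fun k => l.getD k 0 == 0) := by
      simp [pvZeros]
    rw [this]
    exact pvSkip_of_lb _ _ (fun k _ => Nat.zero_le k)
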